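-- pv_equiv track=rewrite | github.com/K1ara1/prg-basics | 04-Functions/test.py | f
-- ===== SOURCE A (Python) =====
-- def f(detector):
--     current = 0
--     count = 0
--     for action in detector:
--         if action == '+':
--             current += 1
--             if current > count:
--                 count = max(count, current)
--         elif action == '-':
--             current -= 1
--     return count >=3
-- ===== SOURCE B (Python) =====
-- def f(detector):
--     # Phase 1: build the full prefix-sum walk (starting at 0); phase 2: max vs 3.
--     sums = [0]
--     for action in detector:
--         delta = 1 if action == '+' else (-1 if action == '-' else 0)
--         sums.append(sums[-1] + delta)
--     return max(sums) >= 3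
-- ===== Notes on version B (the rewrite author's own statement) =====
-- stated objective: alternative
-- what changed: Replaces A's single pass maintaining a running maximum inside branch logic by two phases: first materialise the prefix-sum walk of per-action deltas (+1/-1/0), then reduce it with max and compare to 3.
import Mathlib
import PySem

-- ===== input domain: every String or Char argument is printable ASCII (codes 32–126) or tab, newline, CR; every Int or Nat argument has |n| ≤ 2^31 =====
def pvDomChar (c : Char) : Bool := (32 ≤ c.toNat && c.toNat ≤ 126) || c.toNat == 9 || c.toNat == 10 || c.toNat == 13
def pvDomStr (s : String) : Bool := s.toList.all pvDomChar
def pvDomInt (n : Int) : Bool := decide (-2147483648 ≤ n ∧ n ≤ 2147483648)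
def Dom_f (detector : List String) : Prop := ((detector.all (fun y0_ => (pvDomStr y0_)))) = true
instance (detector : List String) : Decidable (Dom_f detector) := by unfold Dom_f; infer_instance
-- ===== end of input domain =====

-- B differs from A by decomposition: it materialises the prefix-sum walk, then reduces it with max.

-- ===== PORT A =====
-- A: one pass over the actions keeping (current, count); count is bumped only after a '+'.
def f (detector : List String) : Bool :=
  let st := detector.foldl (fun (st : Int × Int) action =>
    let current := st.1
    let count := st.2
    if action == "+" then
      let current := current + 1
      if current > count then (current, max count current) else (current, count)
    else if action == "-" then
      (current - 1, count)
    else (current, count)) (0, 0)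
  decide (st.2 ≥ 3)

-- ===== PORT B =====
-- B's loop: sums starts as [0]; each action appends sums[-1] + delta.
def fAltLoop (detector : List String) (sums : List Int) : List Int :=
  detector.foldl (fun sums action =>
    let delta : Int := if action == "+" then 1 else if action == "-" then -1 else 0
    -- sums[-1]: sums is never empty (it starts as [0]), so last element; default never used
    sums ++ [sums.getLastD 0 + delta]) sums

def f_alt (detector : List String) : Bool :=
  let sums := fAltLoop detector [0]
  -- max(sums): sums is nonempty, so max? is some; default never used
  decide ((PySem.List.max? sums (fun x => x)).getD 0 ≥ 3)

-- ===== PRECONDITION & SPEC =====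
def Spec_f (detector : List String) (out : Bool) : Prop := out = f_alt detector
instance (detector : List String) (out : Bool) : Decidable (Spec_f detector out) := by unfold Spec_f; infer_instance

-- ===== CLAIM (what is proved, stated in full; the proofs are below) =====
def Claim_equal_f : Prop := ∀ (detector : List String), Dom_f detector → Spec_f detector (f detector)

-- ===== LEMMAS AND PROOFS =====

def pvDelta (action : String) : Int :=
  if action == "+" then 1 else if action == "-" then -1 else 0

-- the walk's tail of prefix sums starting from c
def pvAcc (c : Int) : List String → List Int
  | [] => []
  | x :: xs => (c + pvDelta x) :: pvAcc (c + pvDelta x) xs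

theorem fAltLoop_eq_acc (detector : List String) (s : List Int) (hs : s ≠ []) :
    fAltLoop detector s = s ++ pvAcc (s.getLastD 0) detector := by
  induction detector generalizing s with
  | nil => simp [fAltLoop, pvAcc]
  | cons x xs ih =>
    have hne : s ++ [s.getLastD 0 + pvDelta x] ≠ [] := by simp
    have h := ih (s ++ [s.getLastD 0 + pvDelta x]) hne
    simp only [fAltLoop, List.foldl_cons, pvDelta] at h ⊢
    rw [h]
    simp [pvAcc, pvDelta]

theorem foldA_eq (xs : List String) (c k : Int) (hck : c ≤ k) :
    (xs.foldl (fun (st : Int × Int) action =>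
      let current := st.1
      let count := st.2
      if action == "+" then
        let current := current + 1
        if current > count then (current, max count current) else (current, count)
      else if action == "-" then
        (current - 1, count)
      else (current, count)) (c, k)).2 = (pvAcc c xs).foldl max k := by
  induction xs generalizing c k with
  | nil => simp [pvAcc]
  | cons x xs ih =>
    simp only [List.foldl_cons, pvAcc]
    by_cases h1 : x == "+"
    · simp only [h1, if_pos]
      by_cases h2 : c + 1 > k
      · simp only [if_pos h2]
        rw [ih (c + 1) (max k (c + 1)) (le_max_right _ _)]
        simp [pvDelta, h1]
      · simp only [if_neg h2]
        rw [ih (c + 1) k (by omega)]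
        have hm : max k (c + 1) = k := by omega
        simp [pvDelta, h1, hm]
    · by_cases h3 : x == "-"
      · simp only [h1, h3, if_neg, if_pos, Bool.false_eq_true, not_false_iff]
        rw [ih (c - 1) k (by omega)]
        have hm : max k (c + -1) = k := by omega
        simp [pvDelta, h1, h3, hm]
        congr 1
      · simp only [h1, h3, if_neg, Bool.false_eq_true, not_false_iff]
        rw [ih c k hck]
        have hm : max k c = k := by omega
        simp [pvDelta, h1, h3, hm]

-- ===== VERDICT (by name: the statement is the Claim_ definition above) =====
theorem f_spec : Claim_equal_f := by
  intro detector _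
  unfold Spec_f f f_alt
  rw [fAltLoop_eq_acc detector [0] (by simp)]
  have h := foldA_eq detector 0 0 le_rfl
  have hm : PySem.List.max? (([0] : List Int) ++ pvAcc (([0] : List Int).getLastD 0) detector) (fun x => x)
      = some ((pvAcc 0 detector).foldl max 0) := by
    simp [PySem.List.max?_id_cons]
  simp only [h, hm, Option.getD_some]
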